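-- pv_equiv track=rewrite | github.com/wh2per/Programmers-Algorithm | Programmers/Lv4/Lv4_3xn타일링.py | solution
-- ===== SOURCE A (Python) =====
-- def solution(n):
--     answer = 0
--     d = [0] * (n+1)
--     d[0] = 1
--     for i in range(2,n+1,2):
--         d[i] = d[i-2] * 3
--         for j in range(i-4,-1,-2):
--             d[i] += d[j]*2
--         d[i] %= 1000000007
--     return d[n]
-- ===== SOURCE B (Python) =====
-- def solution(n):
--     # O(n) one-pass: keep the last even-index value and the running sum of all
--     # earlier even-index values, instead of re-scanning the whole table each step.
--     if n % 2:
--         return 0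
--     prev, s = 1, 0
--     for _ in range(n // 2):
--         prev, s = (3 * prev + 2 * s) % 1000000007, s + prev
--     return prev
-- ===== Notes on version B (the rewrite author's own statement) =====
-- stated objective: faster
-- what changed: Replaces the O(n^2) table DP with an inner rescan by a one-pass loop that carries only the previous even-index value and a running prefix sum, so no table and no inner loop remain.
import Mathlib
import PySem

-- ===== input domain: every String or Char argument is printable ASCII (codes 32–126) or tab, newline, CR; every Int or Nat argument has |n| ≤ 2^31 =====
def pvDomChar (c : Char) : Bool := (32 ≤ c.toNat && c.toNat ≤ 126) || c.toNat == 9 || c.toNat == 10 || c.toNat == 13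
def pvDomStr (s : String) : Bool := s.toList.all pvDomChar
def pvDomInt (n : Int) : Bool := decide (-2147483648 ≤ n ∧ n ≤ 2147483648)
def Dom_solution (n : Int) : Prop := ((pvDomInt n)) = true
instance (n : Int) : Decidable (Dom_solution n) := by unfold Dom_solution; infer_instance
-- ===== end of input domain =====

-- B replaces A's quadratic table DP (inner rescan of all earlier even entries) by a
-- one-pass loop carrying the previous value and a running prefix sum (objective: faster).

-- ===== PORT A =====
-- Python's list is ported as Array Int (O(1) indexing, like a Python list); all
-- indices reached inside Pre_ are nonnegative and in range, where .toNat is exact.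
def solution (n : Int) : Int :=
  ((PySem.List.pyRange 2 (n+1) 2).foldl
    (fun (d : Array Int) i =>
      let d := d.setIfInBounds i.toNat (d.getD (i-2).toNat 0 * 3)
      let d := (PySem.List.pyRange (i-4) (-1) (-2)).foldl
        (fun (d : Array Int) j => d.setIfInBounds i.toNat
          (d.getD i.toNat 0 + d.getD j.toNat 0 * 2)) d
      d.setIfInBounds i.toNat (PySem.Int.mod (d.getD i.toNat 0) 1000000007))
    ((Array.replicate (n+1).toNat 0).setIfInBounds 0 1)).getD n.toNat 0

-- ===== PORT B =====
def solution_alt (n : Int) : Int :=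
  if PySem.Int.mod n 2 ≠ 0 then 0
  else
    ((PySem.List.pyRange 0 (PySem.Int.floordiv n 2) 1).foldl
      (fun (st : Int × Int) _ =>
        (PySem.Int.mod (3 * st.1 + 2 * st.2) 1000000007, st.2 + st.1))
      (1, 0)).1

-- ===== PRECONDITION & SPEC =====
-- Pre_ excludes negative inputs, on which Python A raises IndexError (its initial write lands in an empty table).
def Pre_solution (n : Int) : Prop := 0 ≤ n
instance (n : Int) : Decidable (Pre_solution n) := by unfold Pre_solution; infer_instance
def pvWitness_solution : Int := 6

def Spec_solution (n : Int) (out : Int) : Prop := out = solution_alt n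
instance (n : Int) (out : Int) : Decidable (Spec_solution n out) := by unfold Spec_solution; infer_instance

-- ===== CLAIM (what is proved, stated in full; the proofs are below) =====
def Claim_equal_solution : Prop := ∀ (n : Int), Dom_solution n → Pre_solution n → Spec_solution n (solution n)

-- ===== LEMMAS AND PROOFS =====

-- (g t, S t): value of the t-th even table entry and the running sum of the earlier ones
def gS : Nat → Int × Int
  | 0 => (1, 0)
  | t+1 => (PySem.Int.mod (3 * (gS t).1 + 2 * (gS t).2) 1000000007, (gS t).2 + (gS t).1)

-- ---- B side ----
theorem b_fold (l : List Int) : ∀ t : Nat,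
    l.foldl (fun (st : Int × Int) _ =>
      (PySem.Int.mod (3 * st.1 + 2 * st.2) 1000000007, st.2 + st.1)) (gS t)
    = gS (t + l.length) := by
  induction l with
  | nil => intro t; simp
  | cons x l ih =>
    intro t
    have h1 : (fun (st : Int × Int) _ =>
        (PySem.Int.mod (3 * st.1 + 2 * st.2) 1000000007, st.2 + st.1)) (gS t) x = gS (t+1) := by
      simp [gS]
    simp only [List.foldl_cons, h1, ih (t+1), List.length_cons]
    ring_nf

theorem solution_alt_even (n : Int) (hn : 0 ≤ n) (he : n % 2 = 0) :
    solution_alt n = (gS (n.toNat / 2)).1 := by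
  have hm : PySem.Int.mod n 2 = 0 := by
    rw [PySem.Int.mod_eq_emod_of_pos (by omega)]; exact he
  have hd : PySem.Int.floordiv n 2 = n / 2 := PySem.Int.floordiv_eq_ediv_of_pos (by omega)
  have hlen : (PySem.List.pyRange 0 (n / 2) 1).length = n.toNat / 2 := by
    rw [PySem.List.length_pyRange_one]; omega
  simp only [solution_alt, hm, hd, ne_eq, not_true_eq_false, if_false]
  have := b_fold (PySem.List.pyRange 0 (n / 2) 1) 0
  simp only [hlen] at this
  have h0 : (gS 0) = ((1 : Int), (0 : Int)) := rfl
  rw [← h0, this]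
  simp

theorem solution_alt_odd (n : Int) (_hn : 0 ≤ n) (he : n % 2 = 1) :
    solution_alt n = 0 := by
  have hm : PySem.Int.mod n 2 = 1 := by
    rw [PySem.Int.mod_eq_emod_of_pos (by omega)]; exact he
  rw [solution_alt, if_pos (by rw [hm]; norm_num)]

-- ---- generic get/set helpers ----
theorem getD_setD_self (d : List Int) (i : Int) (v : Int) (h0 : 0 ≤ i)
    (h1 : i < (d.length : Int)) :
    PySem.List.pyGetD (PySem.List.pySetD d i v) i 0 = v := by
  rw [PySem.List.pySetD_of_nonneg d v h0,
      PySem.List.pyGetD_eq_getElem _ _ h0 (by simpa using h1)]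
  exact List.getElem_set_self (by simp; omega)

theorem getD_setD_ne (d : List Int) (i m v : Int) (h0 : 0 ≤ i) (h0' : 0 ≤ m)
    (hne : m ≠ i) :
    PySem.List.pyGetD (PySem.List.pySetD d i v) m 0 = PySem.List.pyGetD d m 0 := by
  have hi : i = ((i.toNat : Nat) : Int) := by omega
  have hmc : m = ((m.toNat : Nat) : Int) := by omega
  rw [hi, hmc, PySem.List.pySetD_natCast, PySem.List.pyGetD_natCast, PySem.List.pyGetD_natCast]
  have : d.length ≤ i.toNat ∨ i.toNat < d.length := by omega
  rcases this with h | h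
  · rw [List.set_eq_of_length_le (by omega)]
  · simp only [List.getD, List.getElem?_set_ne (by omega : i.toNat ≠ m.toNat)]

theorem setD_setD (d : List Int) (i v w : Int) (h0 : 0 ≤ i) :
    PySem.List.pySetD (PySem.List.pySetD d i v) i w = PySem.List.pySetD d i w := by
  rw [PySem.List.pySetD_of_nonneg d v h0,
      PySem.List.pySetD_of_nonneg (d.set i.toNat v) w h0,
      PySem.List.pySetD_of_nonneg d w h0, List.set_set]

theorem length_setD (d : List Int) (i v : Int) :
    (PySem.List.pySetD d i v).length = d.length := PySem.List.length_pySetD d i v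

theorem getD_set_eq (d : List Int) (j : Nat) (v : Int) (h : j < d.length) :
    (d.set j v).getD j 0 = v := by
  rw [List.getD_eq_getElem _ _ (by simpa using h)]
  exact List.getElem_set_self (by simp; omega)

theorem getD_set_ne (d : List Int) (j m : Nat) (v : Int) (h : m ≠ j) :
    (d.set j v).getD m 0 = d.getD m 0 := by
  simp only [List.getD, List.getElem?_set_ne (by omega : j ≠ m)]

-- ---- inner loop: 'for j in …: d[i] += d[j]*2' accumulates a sum at slot i ----
theorem inner_fold (i : Int) (h0 : 0 ≤ i) :
    ∀ (l : List Int) (d : List Int), i < (d.length : Int) →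
      (∀ j ∈ l, 0 ≤ j ∧ j ≠ i) →
      l.foldl (fun d j => PySem.List.pySetD d i
          (PySem.List.pyGetD d i 0 + PySem.List.pyGetD d j 0 * 2)) d
      = PySem.List.pySetD d i
          (PySem.List.pyGetD d i 0 + (l.map (fun j => PySem.List.pyGetD d j 0 * 2)).sum) := by
  intro l
  induction l with
  | nil =>
    intro d hlen _
    simp only [List.foldl_nil, List.map_nil, List.sum_nil, add_zero]
    rw [PySem.List.pySetD_of_nonneg d _ h0,
        PySem.List.pyGetD_eq_getElem _ _ h0 (by simpa using hlen)]
    exact (List.set_getElem_self (by omega)).symm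
  | cons j0 l ih =>
    intro d hlen hmem
    simp only [List.foldl_cons]
    set d1 := PySem.List.pySetD d i
        (PySem.List.pyGetD d i 0 + PySem.List.pyGetD d j0 0 * 2) with hd1
    have hlen1 : i < (d1.length : Int) := by rw [hd1, length_setD]; exact hlen
    rw [ih d1 hlen1 (fun j hj => hmem j (List.mem_cons_of_mem _ hj))]
    have hget1 : PySem.List.pyGetD d1 i 0
        = PySem.List.pyGetD d i 0 + PySem.List.pyGetD d j0 0 * 2 :=
      getD_setD_self d i _ h0 hlen
    have hmap : l.map (fun j => PySem.List.pyGetD d1 j 0 * 2)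
        = l.map (fun j => PySem.List.pyGetD d j 0 * 2) := by
      apply List.map_congr_left
      intro j hj
      rcases hmem j (List.mem_cons_of_mem _ hj) with ⟨hj0, hjne⟩
      rw [hd1, getD_setD_ne d i j _ h0 hj0 hjne]
    rw [hget1, hmap, hd1, setD_setD d i _ _ h0]
    congr 1
    simp only [List.map_cons, List.sum_cons]
    ring

-- ---- range shapes ----
theorem outer_range (n : Int) (hn : 0 ≤ n) :
    PySem.List.pyRange 2 (n+1) 2
    = (List.range (n / 2).toNat).map (fun k : Nat => (2 : Int) + 2 * (k : Int)) := by
  rw [PySem.List.pyRange_of_pos _ _ (by omega)]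
  have hc : (if (2:Int) < n+1 then ((n+1-2+2-1)/2).toNat else 0) = (n/2).toNat := by
    split_ifs with h <;> omega
  rw [hc]

theorem inner_range (t : Nat) :
    PySem.List.pyRange ((2 : Int) + 2 * (t : Int) - 4) (-1) (-2)
    = (List.range t).map (fun k : Nat => (2 : Int) + 2 * (t : Int) - 4 + -2 * (k : Int)) := by
  rw [PySem.List.pyRange_of_neg _ _ (by norm_num)]
  have hc : (if (-1:Int) < 2 + 2 * (t:Int) - 4
      then ((2 + 2 * (t:Int) - 4 - (-1) + -(-2) - 1) / -(-2)).toNat else 0) = t := by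
    simp only [neg_neg]
    split_ifs with h <;> omega
  rw [hc]

-- ---- the reflected partial sum ----
theorem sum_reflect : ∀ t : Nat,
    ((List.range t).map (fun k => (gS (t-1-k)).1 * 2)).sum = 2 * (gS t).2 := by
  intro t
  induction t with
  | zero => simp [gS]
  | succ t ih =>
    rw [List.range_succ_eq_map]
    simp only [List.map_cons, List.map_map, List.sum_cons]
    have hf : ((List.range t).map ((fun k => (gS (t+1-1-k)).1 * 2) ∘ Nat.succ))
        = (List.range t).map (fun k => (gS (t-1-k)).1 * 2) := by
      apply List.map_congr_left
      intro k hk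
      have h2 : t + 1 - 1 - Nat.succ k = t - 1 - k := by omega
      simp only [Function.comp_apply, h2]
    rw [hf, ih]
    simp only [gS, Nat.add_sub_cancel, Nat.sub_zero]
    ring


-- ---- bridge: the Array-state port equals the same loops over a List state ----
theorem arr_getD (a : Array Int) (k : Nat) (d : Int) : a.getD k d = a.toList.getD k d := by
  rw [Array.getD]
  split
  · rw [List.getD_eq_getElem _ _ (by simpa using ‹k < a.size›)]
    simp
  · rw [List.getD_eq_default _ _ (by simpa using ‹¬ k < a.size›)]

theorem arr_getD_int (a : Array Int) (i : Int) (h : 0 ≤ i) :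
    a.getD i.toNat 0 = PySem.List.pyGetD a.toList i 0 := by
  rw [arr_getD]
  conv_rhs => rw [show i = ((i.toNat : Nat) : Int) from by omega]
  rw [PySem.List.pyGetD_natCast]

theorem arr_setD_int (a : Array Int) (i : Int) (h : 0 ≤ i) (v : Int) :
    (a.setIfInBounds i.toNat v).toList = PySem.List.pySetD a.toList i v := by
  rw [Array.toList_setIfInBounds, PySem.List.pySetD_of_nonneg a.toList v h]

theorem foldl_toList (l : List Int) (f : Array Int → Int → Array Int)
    (g : List Int → Int → List Int) :
    ∀ a : Array Int, (∀ (a : Array Int), ∀ i ∈ l, (f a i).toList = g a.toList i) →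
    (l.foldl f a).toList = l.foldl g a.toList := by
  induction l with
  | nil => intro a _; simp
  | cons x l ih =>
    intro a h
    simp only [List.foldl_cons]
    rw [← h a x (by simp)]
    exact ih (f a x) (fun a' i hi => h a' i (List.mem_cons_of_mem _ hi))

theorem solution_eq_list (n : Int) (hn : 0 ≤ n) :
    solution n
    = PySem.List.pyGetD
        ((PySem.List.pyRange 2 (n+1) 2).foldl
          (fun d i =>
            let d := PySem.List.pySetD d i (PySem.List.pyGetD d (i-2) 0 * 3)
            let d := (PySem.List.pyRange (i-4) (-1) (-2)).foldl
              (fun d j => PySem.List.pySetD d i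
                (PySem.List.pyGetD d i 0 + PySem.List.pyGetD d j 0 * 2)) d
            PySem.List.pySetD d i (PySem.Int.mod (PySem.List.pyGetD d i 0) 1000000007))
          (PySem.List.pySetD (List.replicate (n+1).toNat 0) 0 1))
        n 0 := by
  unfold solution
  have hfold := foldl_toList (PySem.List.pyRange 2 (n+1) 2)
    (fun (d : Array Int) i =>
      let d := d.setIfInBounds i.toNat (d.getD (i-2).toNat 0 * 3)
      let d := (PySem.List.pyRange (i-4) (-1) (-2)).foldl
        (fun (d : Array Int) j => d.setIfInBounds i.toNat
          (d.getD i.toNat 0 + d.getD j.toNat 0 * 2)) d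
      d.setIfInBounds i.toNat (PySem.Int.mod (d.getD i.toNat 0) 1000000007))
    (fun d i =>
      let d := PySem.List.pySetD d i (PySem.List.pyGetD d (i-2) 0 * 3)
      let d := (PySem.List.pyRange (i-4) (-1) (-2)).foldl
        (fun d j => PySem.List.pySetD d i
          (PySem.List.pyGetD d i 0 + PySem.List.pyGetD d j 0 * 2)) d
      PySem.List.pySetD d i (PySem.Int.mod (PySem.List.pyGetD d i 0) 1000000007))
    ((Array.replicate (n+1).toNat 0).setIfInBounds 0 1)
    (by
      intro a i hi
      rcases (PySem.List.mem_pyRange_iff_of_pos (by norm_num) i).mp hi with ⟨hi1, hi2, hi3⟩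
      have hi0 : (0:Int) ≤ i := by omega
      dsimp only
      have hinner := foldl_toList (PySem.List.pyRange (i-4) (-1) (-2))
        (fun (d : Array Int) j => d.setIfInBounds i.toNat
          (d.getD i.toNat 0 + d.getD j.toNat 0 * 2))
        (fun d j => PySem.List.pySetD d i
          (PySem.List.pyGetD d i 0 + PySem.List.pyGetD d j 0 * 2))
        (a.setIfInBounds i.toNat (a.getD (i-2).toNat 0 * 3))
        (by
          intro a' j hj
          rcases (PySem.List.mem_pyRange_iff_of_neg (by norm_num) j).mp hj with ⟨hj1, hj2, hj3⟩
          have hj0 : (0:Int) ≤ j := by omega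
          dsimp only
          rw [arr_setD_int a' i hi0, arr_getD_int a' i hi0, arr_getD_int a' j hj0])
      rw [arr_setD_int _ i hi0, arr_getD_int _ i hi0, hinner,
          arr_setD_int a i hi0, arr_getD_int a (i-2) (by omega)])
  rw [arr_getD_int _ n hn, hfold,
      PySem.List.pySetD_of_nonneg (List.replicate (n+1).toNat 0) 1 (le_refl (0:Int)),
      Int.toNat_zero]
  simp only [Array.toList_setIfInBounds, Array.toList_replicate]

-- ---- the outer loop invariant ----
def AInv (n : Int) (t : Nat) (d : List Int) : Prop :=
  d.length = n.toNat + 1 ∧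
  ∀ m : Nat, m ≤ n.toNat →
    d.getD m 0 = if m % 2 = 0 ∧ m ≤ 2*t then (gS (m/2)).1 else 0

theorem a_loop (n : Int) (hn : 0 ≤ n) : ∀ t : Nat, t ≤ (n / 2).toNat →
    AInv n t (((List.range t).map (fun k : Nat => (2 : Int) + 2 * (k : Int))).foldl
      (fun d i =>
        let d := PySem.List.pySetD d i (PySem.List.pyGetD d (i-2) 0 * 3)
        let d := (PySem.List.pyRange (i-4) (-1) (-2)).foldl
          (fun d j => PySem.List.pySetD d i
            (PySem.List.pyGetD d i 0 + PySem.List.pyGetD d j 0 * 2)) d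
        PySem.List.pySetD d i (PySem.Int.mod (PySem.List.pyGetD d i 0) 1000000007))
      (PySem.List.pySetD (List.replicate (n+1).toNat 0) 0 1)) := by
  intro t
  induction t with
  | zero =>
    intro _
    simp only [List.range_zero, List.map_nil, List.foldl_nil]
    constructor
    · rw [length_setD]; simp; omega
    · intro m hm
      rw [PySem.List.pySetD_of_nonneg _ _ (le_refl 0), Int.toNat_zero]
      cases m with
      | zero =>
        rw [getD_set_eq _ _ _ (by rw [List.length_replicate]; omega)]
        simp [gS]
      | succ k =>
        rw [getD_set_ne _ _ _ _ (by omega)]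
        rw [List.getD_replicate _ (by omega)]
        have : ¬((k+1) % 2 = 0 ∧ k+1 ≤ 2*0) := by omega
        rw [if_neg this]
  | succ t ih =>
    intro ht
    have ht' : t ≤ (n / 2).toNat := by omega
    obtain ⟨hlen, hval⟩ := ih ht'
    have h2t : 2*(t+1) ≤ n.toNat := by omega
    rw [List.range_succ, List.map_append, List.foldl_append]
    set d := ((List.range t).map (fun k : Nat => (2 : Int) + 2 * (k : Int))).foldl
      (fun d i =>
        let d := PySem.List.pySetD d i (PySem.List.pyGetD d (i-2) 0 * 3)
        let d := (PySem.List.pyRange (i-4) (-1) (-2)).foldl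
          (fun d j => PySem.List.pySetD d i
            (PySem.List.pyGetD d i 0 + PySem.List.pyGetD d j 0 * 2)) d
        PySem.List.pySetD d i (PySem.Int.mod (PySem.List.pyGetD d i 0) 1000000007))
      (PySem.List.pySetD (List.replicate (n+1).toNat 0) 0 1) with hd
    simp only [List.map_cons, List.map_nil, List.foldl_cons, List.foldl_nil]
    set i : Int := 2 + 2 * (t : Int) with hi
    have hi0 : (0:Int) ≤ i := by rw [hi]; omega
    have hiL : i < (d.length : Int) := by rw [hlen, hi]; push_cast; omega
    -- the first write d[i] = d[i-2]*3
    have hread : PySem.List.pyGetD d (i-2) 0 = (gS t).1 := by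
      have h1 : i - 2 = ((2*t : Nat) : Int) := by rw [hi]; push_cast; ring
      rw [h1, PySem.List.pyGetD_natCast, hval (2*t) (by omega)]
      rw [if_pos (by omega)]
      have h4 : 2*t/2 = t := by omega
      rw [h4]
    set d1 := PySem.List.pySetD d i (PySem.List.pyGetD d (i-2) 0 * 3) with hd1
    have hlen1 : (d1.length : Int) = (d.length : Int) := by rw [hd1, length_setD]
    -- the inner loop
    have hrange : PySem.List.pyRange (i-4) (-1) (-2)
        = (List.range t).map (fun k : Nat => (2 : Int) + 2 * (t : Int) - 4 + -2 * (k : Int)) := by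
      rw [hi]
      have : (2 : Int) + 2 * (t : Int) - 4 = 2 + 2 * (t : Int) - 4 := rfl
      exact inner_range t
    have hinner := inner_fold i hi0
      ((List.range t).map (fun k : Nat => (2 : Int) + 2 * (t : Int) - 4 + -2 * (k : Int)))
      d1 (by omega)
      (by
        intro j hj
        rcases List.mem_map.mp hj with ⟨k, hk, rfl⟩
        have hk' : k < t := List.mem_range.mp hk
        constructor
        · omega
        · rw [hi]; omega)
    rw [hrange, hinner]
    -- evaluate the accumulated sum
    have hget1 : PySem.List.pyGetD d1 i 0 = (gS t).1 * 3 := by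
      rw [hd1, getD_setD_self d i _ hi0 hiL, hread]
    have hmap : ((List.range t).map (fun k : Nat => (2 : Int) + 2 * (t : Int) - 4 + -2 * (k : Int))).map
          (fun j => PySem.List.pyGetD d1 j 0 * 2)
        = (List.range t).map (fun k => (gS (t-1-k)).1 * 2) := by
      rw [List.map_map]
      apply List.map_congr_left
      intro k hk
      have hk' : k < t := List.mem_range.mp hk
      simp only [Function.comp_apply]
      have hj : (2 : Int) + 2 * (t : Int) - 4 + -2 * (k : Int) = ((2*(t-1-k) : Nat) : Int) := by
        push_cast; omega
      rw [hj, hd1, getD_setD_ne d i _ _ hi0 (by omega) (by rw [hi]; push_cast; omega)]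
      rw [PySem.List.pyGetD_natCast, hval (2*(t-1-k)) (by omega), if_pos (by omega)]
      have h4 : 2*(t-1-k)/2 = t-1-k := by omega
      rw [h4]
    rw [hget1, hmap, sum_reflect t, hd1, setD_setD d i _ _ hi0]
    -- the final write d[i] %= p
    have hgetV : PySem.List.pyGetD (PySem.List.pySetD d i ((gS t).1 * 3 + 2 * (gS t).2)) i 0
        = (gS t).1 * 3 + 2 * (gS t).2 := getD_setD_self d i _ hi0 hiL
    rw [hgetV, setD_setD d i _ _ hi0]
    have hmodv : PySem.Int.mod ((gS t).1 * 3 + 2 * (gS t).2) 1000000007 = (gS (t+1)).1 := by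
      have h3 : (gS t).1 * 3 + 2 * (gS t).2 = 3 * (gS t).1 + 2 * (gS t).2 := by ring
      rw [h3]; rfl
    rw [hmodv]
    -- re-establish the invariant
    constructor
    · rw [length_setD]; exact hlen
    · intro m hm
      rw [PySem.List.pySetD_of_nonneg d _ hi0]
      have hiN : i.toNat = 2*t + 2 := by rw [hi]; omega
      by_cases hcase : m = 2*t + 2
      · rw [hiN, hcase, getD_set_eq _ _ _ (by omega)]
        rw [if_pos (by omega)]
        have h4 : (2*t+2)/2 = t+1 := by omega
        rw [h4]
      · rw [getD_set_ne _ _ _ _ (by omega), hval m hm]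
        have hiff : (m % 2 = 0 ∧ m ≤ 2*t) ↔ (m % 2 = 0 ∧ m ≤ 2*(t+1)) := by omega
        rw [if_congr hiff rfl rfl]

-- ===== VERDICT (by name: the statement is the Claim_ definition above) =====
theorem solution_spec : Claim_equal_solution := by
  intro n _ hpre
  unfold Spec_solution
  have hpre' : (0:Int) ≤ n := hpre
  rw [solution_eq_list n hpre', outer_range n hpre']
  obtain ⟨hlen, hval⟩ := a_loop n hpre' (n / 2).toNat (le_refl _)
  set D := ((List.range (n / 2).toNat).map (fun k : Nat => (2 : Int) + 2 * (k : Int))).foldl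
      (fun d i =>
        let d := PySem.List.pySetD d i (PySem.List.pyGetD d (i-2) 0 * 3)
        let d := (PySem.List.pyRange (i-4) (-1) (-2)).foldl
          (fun d j => PySem.List.pySetD d i
            (PySem.List.pyGetD d i 0 + PySem.List.pyGetD d j 0 * 2)) d
        PySem.List.pySetD d i (PySem.Int.mod (PySem.List.pyGetD d i 0) 1000000007))
      (PySem.List.pySetD (List.replicate (n+1).toNat 0) 0 1) with hD
  have hx : PySem.List.pyGetD D n 0 = D.getD n.toNat 0 := by
    conv_lhs => rw [show n = ((n.toNat : Nat) : Int) from by omega]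
    rw [PySem.List.pyGetD_natCast]
  rw [hx, hval n.toNat (le_refl _)]
  rcases Int.emod_two_eq_zero_or_one n with he | he
  · rw [solution_alt_even n hpre' he, if_pos (by omega)]
  · rw [solution_alt_odd n hpre' he, if_neg (by omega)]
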